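-- pv_equiv track=rewrite | github.com/riy4dul/tap_task | Tap_Task.py | calculate_total_earnings
-- ===== SOURCE A (Python) =====
-- def calculate_total_earnings(X, Y, Z, N, time_ranges):
--     total_earnings = 0
--
--
--     for i in range(N):
--         start_time, end_time = time_ranges[i]
--
--         # Loop through each hour in the day
--         for hour in range(start_time, end_time):
--
--             if 0 <= hour < 9 or 22 <= hour < 24:
--                 total_earnings += Z
--             elif 9 <= hour < 17:
--                 total_earnings += X
--             else:
--                 total_earnings += Y
--
--     return total_earnings
-- ===== SOURCE B (Python) =====
-- def calculate_total_earnings(X, Y, Z, N, time_ranges):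
--     def ov(a, b, lo, hi):
--         return max(0, min(b, hi) - max(a, lo))
--     total = 0
--     for s, e in time_ranges[:max(0, N)]:
--         h = max(0, e - s)
--         cX = ov(s, e, 9, 17)
--         cZ = ov(s, e, 0, 9) + ov(s, e, 22, 24)
--         total += X * cX + Z * cZ + Y * (h - cX - cZ)
--     return total
-- ===== Notes on version B (the rewrite author's own statement) =====
-- stated objective: faster
-- what changed: Replaces the per-hour inner loop with closed-form interval-overlap counts per band (Y as the residual), so each range costs O(1) instead of O(end-start).
import Mathlib
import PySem

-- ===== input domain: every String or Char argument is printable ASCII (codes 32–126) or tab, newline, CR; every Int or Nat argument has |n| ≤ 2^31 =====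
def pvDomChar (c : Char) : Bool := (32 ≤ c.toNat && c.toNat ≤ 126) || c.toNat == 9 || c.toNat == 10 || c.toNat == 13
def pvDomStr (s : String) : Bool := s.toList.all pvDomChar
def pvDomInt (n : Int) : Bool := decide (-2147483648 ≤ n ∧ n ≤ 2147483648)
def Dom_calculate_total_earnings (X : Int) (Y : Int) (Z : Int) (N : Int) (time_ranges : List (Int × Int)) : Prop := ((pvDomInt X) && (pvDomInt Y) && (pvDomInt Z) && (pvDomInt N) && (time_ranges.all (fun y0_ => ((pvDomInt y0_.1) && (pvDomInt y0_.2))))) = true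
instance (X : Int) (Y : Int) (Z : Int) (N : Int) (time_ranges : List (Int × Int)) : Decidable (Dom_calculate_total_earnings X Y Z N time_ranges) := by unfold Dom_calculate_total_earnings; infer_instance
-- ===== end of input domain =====

-- B replaces A's per-hour inner loop with O(1) interval-overlap counts per band (Y as the residual): faster.

-- ===== PORT A =====
def calculate_total_earnings (X : Int) (Y : Int) (Z : Int) (N : Int) (time_ranges : List (Int × Int)) : Int :=
  (PySem.List.pyRange 0 N 1).foldl (fun total_earnings i =>
    let p := PySem.List.pyGetD time_ranges i (0, 0)   -- time_ranges[i]; in range under Pre_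
    (PySem.List.pyRange p.1 p.2 1).foldl (fun t hour =>
      if (0 ≤ hour ∧ hour < 9) ∨ (22 ≤ hour ∧ hour < 24) then t + Z
      else if 9 ≤ hour ∧ hour < 17 then t + X
      else t + Y) total_earnings) 0

-- ===== PORT B =====
def pvOv (a b lo hi : Int) : Int := max 0 (min b hi - max a lo)

def calculate_total_earnings_alt (X : Int) (Y : Int) (Z : Int) (N : Int) (time_ranges : List (Int × Int)) : Int :=
  (PySem.List.slice time_ranges none (some (max 0 N))).foldl (fun total p =>
    let h := max 0 (p.2 - p.1)
    let cX := pvOv p.1 p.2 9 17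
    let cZ := pvOv p.1 p.2 0 9 + pvOv p.1 p.2 22 24
    total + (X * cX + Z * cZ + Y * (h - cX - cZ))) 0

-- ===== PRECONDITION & SPEC =====
-- Pre_ excludes exactly the inputs where A raises IndexError: N larger than len(time_ranges).
def Pre_calculate_total_earnings (X : Int) (Y : Int) (Z : Int) (N : Int) (time_ranges : List (Int × Int)) : Prop :=
  N ≤ (time_ranges.length : Int)
instance (X : Int) (Y : Int) (Z : Int) (N : Int) (time_ranges : List (Int × Int)) : Decidable (Pre_calculate_total_earnings X Y Z N time_ranges) := by unfold Pre_calculate_total_earnings; infer_instance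

def pvWitness_calculate_total_earnings : Int × Int × Int × Int × (List (Int × Int)) := (5, 3, 7, 2, [(8, 12), (20, 23)])

def Spec_calculate_total_earnings (X : Int) (Y : Int) (Z : Int) (N : Int) (time_ranges : List (Int × Int)) (out : Int) : Prop := out = calculate_total_earnings_alt X Y Z N time_ranges
instance (X : Int) (Y : Int) (Z : Int) (N : Int) (time_ranges : List (Int × Int)) (out : Int) : Decidable (Spec_calculate_total_earnings X Y Z N time_ranges out) := by unfold Spec_calculate_total_earnings; infer_instance

-- ===== CLAIM (what is proved, stated in full; the proofs are below) =====
def Claim_equal_calculate_total_earnings : Prop := ∀ (X : Int) (Y : Int) (Z : Int) (N : Int) (time_ranges : List (Int × Int)), Dom_calculate_total_earnings X Y Z N time_ranges → Pre_calculate_total_earnings X Y Z N time_ranges → Spec_calculate_total_earnings X Y Z N time_ranges (calculate_total_earnings X Y Z N time_ranges)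

-- ===== LEMMAS AND PROOFS =====

-- B's per-range contribution, as a named term
def pvTerm (X Y Z s e : Int) : Int :=
  X * pvOv s e 9 17 + Z * (pvOv s e 0 9 + pvOv s e 22 24)
    + Y * (max 0 (e - s) - pvOv s e 9 17 - (pvOv s e 0 9 + pvOv s e 22 24))

theorem pvTerm_zero (X Y Z s e : Int) (h : e ≤ s) : pvTerm X Y Z s e = 0 := by
  unfold pvTerm pvOv
  have h1 : max (0:Int) (min e 17 - max s 9) = 0 := by omega
  have h2 : max (0:Int) (min e 9 - max s 0) = 0 := by omega
  have h3 : max (0:Int) (min e 24 - max s 22) = 0 := by omega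
  have h4 : max (0:Int) (e - s) = 0 := by omega
  rw [h1, h2, h3, h4]; ring

theorem pvOv_cons (s e lo hi : Int) (h : s < e) :
    pvOv s e lo hi = (if lo ≤ s ∧ s < hi then 1 else 0) + pvOv (s+1) e lo hi := by
  unfold pvOv; split_ifs <;> omega

theorem pvTerm_cons (X Y Z s e : Int) (h : s < e) :
    pvTerm X Y Z s e =
      (if (0 ≤ s ∧ s < 9) ∨ (22 ≤ s ∧ s < 24) then Z else if 9 ≤ s ∧ s < 17 then X else Y)
        + pvTerm X Y Z (s+1) e := by
  unfold pvTerm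
  rw [pvOv_cons s e 9 17 h, pvOv_cons s e 0 9 h, pvOv_cons s e 22 24 h]
  have hh : max (0:Int) (e - s) = 1 + max 0 (e - (s+1)) := by omega
  rw [hh]
  split_ifs <;> first | (exfalso; omega) | ring

-- A's inner per-hour loop equals acc + pvTerm
theorem pvInner_eq (X Y Z : Int) : ∀ (n : Nat) (s e : Int), (e - s).toNat = n → ∀ acc : Int,
    (PySem.List.pyRange s e 1).foldl (fun t hour =>
      if (0 ≤ hour ∧ hour < 9) ∨ (22 ≤ hour ∧ hour < 24) then t + Z
      else if 9 ≤ hour ∧ hour < 17 then t + X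
      else t + Y) acc = acc + pvTerm X Y Z s e := by
  intro n
  induction n with
  | zero =>
    intro s e hn acc
    rw [PySem.List.pyRange_one_eq_nil (by omega)]
    simp [pvTerm_zero X Y Z s e (by omega)]
  | succ m ih =>
    intro s e hn acc
    rw [PySem.List.pyRange_one_cons (by omega)]
    simp only [List.foldl_cons]
    rw [ih (s+1) e (by omega)]
    rw [pvTerm_cons X Y Z s e (by omega)]
    split_ifs <;> ring

-- A's outer loop over indices 0..n-1 equals B's fold over the first n ranges
theorem pvOuter_eq (X Y Z : Int) : ∀ (n : Nat) (tr : List (Int × Int)), n ≤ tr.length → ∀ acc : Int,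
    (PySem.List.pyRange 0 (n : Int) 1).foldl (fun total_earnings i =>
      let p := PySem.List.pyGetD tr i (0, 0)
      (PySem.List.pyRange p.1 p.2 1).foldl (fun t hour =>
        if (0 ≤ hour ∧ hour < 9) ∨ (22 ≤ hour ∧ hour < 24) then t + Z
        else if 9 ≤ hour ∧ hour < 17 then t + X
        else t + Y) total_earnings) acc
    = (tr.take n).foldl (fun total p => total + pvTerm X Y Z p.1 p.2) acc := by
  intro n
  induction n with
  | zero =>
    intro tr _ acc
    rw [PySem.List.pyRange_one_eq_nil (by omega)]
    simp
  | succ m ih =>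
    intro tr hlen acc
    have hcast : ((m + 1 : Nat) : Int) = (m : Int) + 1 := by push_cast; ring
    rw [hcast, PySem.List.pyRange_one_succ_right (by omega)]
    rw [List.foldl_append, ih tr (by omega) acc]
    have hm : m < tr.length := by omega
    have hget : PySem.List.pyGetD tr (m : Int) (0, 0) = tr[m] := by
      rw [PySem.List.pyGetD_eq_getElem tr (0, 0) (by omega) (by exact_mod_cast hm)]
      simp
    have htake : tr.take (m + 1) = tr.take m ++ [tr[m]] := by
      rw [List.take_add_one]; simp [hm]
    rw [htake, List.foldl_append]
    simp only [List.foldl_cons, List.foldl_nil, hget]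
    rw [pvInner_eq X Y Z (tr[m].2 - tr[m].1).toNat tr[m].1 tr[m].2 rfl]

-- ===== VERDICT (by name: the statement is the Claim_ definition above) =====
theorem calculate_total_earnings_spec : Claim_equal_calculate_total_earnings := by
  intro X Y Z N tr _ hpre
  unfold Spec_calculate_total_earnings calculate_total_earnings calculate_total_earnings_alt
  rw [PySem.List.slice_to _ (by omega)]
  have hN0 : ((max 0 N).toNat : Int) = max 0 N := by omega
  have hle : (max 0 N).toNat ≤ tr.length := by
    have := hpre; unfold Pre_calculate_total_earnings at this; omega
  have hrange : PySem.List.pyRange 0 N 1 = PySem.List.pyRange 0 ((max 0 N).toNat : Int) 1 := by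
    by_cases h : N ≤ 0
    · rw [PySem.List.pyRange_one_eq_nil (by omega), PySem.List.pyRange_one_eq_nil (by omega)]
    · rw [hN0]; congr 1; omega
  rw [hrange, pvOuter_eq X Y Z (max 0 N).toNat tr hle 0]
  unfold pvTerm
  rfl
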